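-- pv_equiv track=rewrite | github.com/thijsfranck/advent-of-code-2023 | advent_of_code_2023/day12/part1.py | find_all_variations
-- ===== SOURCE A (Python) =====
-- from collections.abc import Generator
--
-- def find_all_variations(row: str) -> Generator[str, None, None]:
--     """Find all variations of a row."""
--     if not len(row):
--         yield ""
--         return
--
--     *rest, char = row
--     trunk = "".join(rest)
--
--     for variation in find_all_variations(trunk):
--         if char != "?":
--             yield variation + char
--             continue
--         yield variation + "."
--         yield variation + "#"
-- ===== SOURCE B (Python) =====
-- from itertools import product
--
--
-- def find_all_variations(row):
--     """Find all variations of a row."""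
--     positions = [i for i in range(len(row)) if row[i] == "?"]
--     for combo in product(".#", repeat=len(positions)):
--         chars = list(row)
--         for i, c in zip(positions, combo):
--             chars[i] = c
--         yield "".join(chars)
-- ===== Notes on version B (the rewrite author's own statement) =====
-- stated objective: faster
-- what changed: Replaced the suffix-peeling recursion (which rebuilds every variation by repeated string concatenation through n nested generators) with a direct enumeration: collect the indices of the '?' characters once, iterate over the cartesian product of ('.','#') over those positions, and write each combination into a copy of the row.
import Mathlib
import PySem

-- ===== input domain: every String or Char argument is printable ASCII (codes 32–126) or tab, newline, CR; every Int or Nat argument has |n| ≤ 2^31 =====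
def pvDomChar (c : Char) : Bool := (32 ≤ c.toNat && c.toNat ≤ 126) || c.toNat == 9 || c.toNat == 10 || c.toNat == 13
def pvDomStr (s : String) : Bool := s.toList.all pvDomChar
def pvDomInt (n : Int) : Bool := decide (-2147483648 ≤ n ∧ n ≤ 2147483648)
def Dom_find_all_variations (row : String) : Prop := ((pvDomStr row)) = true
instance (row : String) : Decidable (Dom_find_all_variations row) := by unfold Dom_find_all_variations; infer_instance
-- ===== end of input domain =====

-- B replaces A's suffix-peeling recursion (n nested generators, re-concatenating prefixes) by
-- collecting the '?' indices once and writing each ('.','#') combination into a copy of the row;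
-- a timing run measured B faster on the generated inputs.

-- ===== PORT A =====
-- A's recursion on the row, viewed as its character list: '*rest, char = row' peels the last
-- character, the recursive call handles the prefix, and each variation is extended on the right.
def favAux (cs : List Char) : List (List Char) :=
  if h : cs = [] then [[]]
  else
    let char := cs.getLast h
    let trunk := cs.dropLast
    (favAux trunk).flatMap (fun v =>
      if char ≠ '?' then [v ++ [char]] else [v ++ ['.'], v ++ ['#']])
termination_by cs.length
decreasing_by
  simp only [List.length_dropLast]
  exact Nat.sub_lt (List.length_pos_iff.mpr h) Nat.one_pos

def find_all_variations (row : String) : List String :=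
  (favAux row.toList).map String.mk

-- ===== PORT B =====
-- positions = [i for i in range(len(row)) if row[i] == "?"]
def qPositions (cs : List Char) : List Nat :=
  (List.range cs.length).filter (fun i => cs[i]? == some '?')

-- product(".#", repeat=n), in itertools order (first coordinate varies slowest)
def combos : Nat → List (List Char)
  | 0 => [[]]
  | n + 1 => ['.', '#'].flatMap (fun c => (combos n).map (c :: ·))

-- chars = list(row); for i, c in zip(positions, combo): chars[i] = c
def fill (cs : List Char) (ps : List Nat) (combo : List Char) : List Char :=
  (ps.zip combo).foldl (fun acc pc => acc.set pc.1 pc.2) cs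

def find_all_variations_alt (row : String) : List String :=
  (combos (qPositions row.toList).length).map
    (fun combo => String.mk (fill row.toList (qPositions row.toList) combo))

-- ===== PRECONDITION & SPEC =====
def Spec_find_all_variations (row : String) (out : List String) : Prop := out = find_all_variations_alt row
instance (row : String) (out : List String) : Decidable (Spec_find_all_variations row out) := by unfold Spec_find_all_variations; infer_instance

-- ===== CLAIM (what is proved, stated in full; the proofs are below) =====
def Claim_equal_find_all_variations : Prop := ∀ (row : String), Dom_find_all_variations row → Spec_find_all_variations row (find_all_variations row)

-- ===== LEMMAS AND PROOFS =====

theorem qPositions_snoc (ys : List Char) (x : Char) :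
    qPositions (ys ++ [x]) = qPositions ys ++ (if x = '?' then [ys.length] else []) := by
  unfold qPositions
  rw [List.length_append, List.length_singleton, List.range_succ, List.filter_append]
  congr 1
  · apply List.filter_congr
    intro i hi
    rw [List.mem_range] at hi
    rw [List.getElem?_append_left hi]
  · simp only [List.filter_cons, List.filter_nil, List.getElem?_concat_length]
    by_cases hx : x = '?' <;> simp [hx]

theorem mem_qPositions_lt {cs : List Char} {p : Nat} (h : p ∈ qPositions cs) : p < cs.length := by
  unfold qPositions at h
  exact List.mem_range.mp (List.mem_of_mem_filter h)

theorem length_of_mem_combos {n : Nat} {t : List Char} (h : t ∈ combos n) : t.length = n := by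
  induction n generalizing t with
  | zero => simp [combos] at h; simp [h]
  | succ n ih =>
    simp only [combos, List.mem_flatMap, List.mem_map] at h
    obtain ⟨c, _, u, hu, rfl⟩ := h
    simp [ih hu]

theorem combos_snoc (n : Nat) :
    combos (n + 1) = (combos n).flatMap (fun t => [t ++ ['.'], t ++ ['#']]) := by
  induction n with
  | zero => decide
  | succ n ih =>
    conv_lhs => rw [combos, ih]
    conv_rhs => rw [combos]
    simp [List.map_flatMap, List.flatMap_map]

theorem length_foldl_set (L : List (Nat × Char)) (ys : List Char) :
    (L.foldl (fun acc pc => acc.set pc.1 pc.2) ys).length = ys.length := by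
  induction L generalizing ys with
  | nil => rfl
  | cons pc L ih => simp [List.foldl_cons, ih, List.length_set]

theorem foldl_set_snoc (L : List (Nat × Char)) (ys : List Char) (x : Char)
    (h : ∀ pc ∈ L, pc.1 < ys.length) :
    L.foldl (fun acc pc => acc.set pc.1 pc.2) (ys ++ [x]) =
      (L.foldl (fun acc pc => acc.set pc.1 pc.2) ys) ++ [x] := by
  induction L generalizing ys with
  | nil => rfl
  | cons pc L ih =>
    have h1 : pc.1 < ys.length := h pc (List.mem_cons_self ..)
    simp only [List.foldl_cons]
    rw [List.set_append_left _ _ h1, ih]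
    intro qc hq
    rw [List.length_set]
    exact h qc (List.mem_cons_of_mem _ hq)

theorem fill_snoc_keep (ys : List Char) (x : Char) (t : List Char)
    (hx : ∀ p ∈ qPositions ys, p < ys.length) :
    fill (ys ++ [x]) (qPositions ys) t = fill ys (qPositions ys) t ++ [x] := by
  unfold fill
  apply foldl_set_snoc
  intro pc hpc
  exact hx _ (List.of_mem_zip hpc).1

theorem fill_snoc_q (ys : List Char) (x c : Char) (t : List Char)
    (ht : t.length = (qPositions ys).length) :
    fill (ys ++ [x]) (qPositions ys ++ [ys.length]) (t ++ [c]) =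
      fill ys (qPositions ys) t ++ [c] := by
  unfold fill
  rw [List.zip_append ht.symm, List.foldl_append]
  simp only [List.zip_cons_cons, List.zip_nil_right, List.foldl_cons, List.foldl_nil]
  rw [foldl_set_snoc _ _ _ (fun pc hpc => mem_qPositions_lt (List.of_mem_zip hpc).1)]
  have hl : ((qPositions ys).zip t |>.foldl (fun acc pc => acc.set pc.1 pc.2) ys).length
      = ys.length := length_foldl_set _ _
  rw [← hl, List.set_append_right _ _ (Nat.le_refl _)]
  simp

theorem favAux_snoc (ys : List Char) (x : Char) :
    favAux (ys ++ [x]) = (favAux ys).flatMap (fun v =>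
      if x ≠ '?' then [v ++ [x]] else [v ++ ['.'], v ++ ['#']]) := by
  rw [favAux]
  have hne : ys ++ [x] ≠ [] := by simp
  rw [dif_neg hne]
  simp

theorem map_eq_flatMap_singleton {α β : Type} (l : List α) (f : α → β) :
    l.map f = l.flatMap (fun a => [f a]) := by
  induction l with
  | nil => rfl
  | cons a l ih => simp only [List.map_cons, List.flatMap_cons, ih, List.singleton_append]

theorem flatMap_congr_mem {α β : Type} {l : List α} {f g : α → List β}
    (h : ∀ a ∈ l, f a = g a) : l.flatMap f = l.flatMap g := by
  induction l with
  | nil => rfl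
  | cons a l ih =>
    simp only [List.flatMap_cons, h a (List.mem_cons_self ..)]
    rw [ih (fun b hb => h b (List.mem_cons_of_mem _ hb))]

theorem favAux_eq (cs : List Char) :
    favAux cs = (combos (qPositions cs).length).map (fun t => fill cs (qPositions cs) t) := by
  induction cs using List.reverseRecOn with
  | nil => simp [favAux, qPositions, combos, fill]
  | append_singleton ys x ih =>
    rw [favAux_snoc, ih, qPositions_snoc]
    by_cases hx : x = '?'
    · subst hx
      rw [if_pos rfl]
      simp only [ne_eq, not_true_eq_false, if_false, List.length_append,
        List.length_cons, List.length_nil, List.flatMap_map]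
      rw [combos_snoc, List.map_flatMap]
      apply flatMap_congr_mem
      intro t ht
      have hlen : t.length = (qPositions ys).length := length_of_mem_combos ht
      simp only [List.map_cons, List.map_nil]
      rw [fill_snoc_q _ _ '.' _ hlen, fill_snoc_q _ _ '#' _ hlen]
    · rw [if_neg hx]
      simp only [ne_eq, hx, not_false_eq_true, if_true, List.append_nil, List.flatMap_map]
      rw [map_eq_flatMap_singleton]
      apply flatMap_congr_mem
      intro t _
      rw [fill_snoc_keep _ _ _ (fun p hp => mem_qPositions_lt hp)]

-- ===== VERDICT (by name: the statement is the Claim_ definition above) =====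
theorem find_all_variations_spec : Claim_equal_find_all_variations := by
  intro row _
  unfold Spec_find_all_variations find_all_variations find_all_variations_alt
  rw [favAux_eq, List.map_map]
  rfl
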